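-- pv_equiv track=rewrite | github.com/OppoTrain/RAG1_langchain | fastapi/main.py | truncate_and_format_context
-- ===== SOURCE A (Python) =====
-- def truncate_and_format_context(cleaned_text, max_length=3000):
--     """
--     Truncates and formats the context to a manageable length while preserving the most relevant information.
--     """
--
--     sentences = cleaned_text.split('\n')
--     formatted_text = []
--     current_length = 0
--
--     for sentence in sentences:
--         if current_length + len(sentence) <= max_length:
--             formatted_text.append(sentence)
--             current_length += len(sentence)
--         else:
--             break
--
--     return '\n'.join(formatted_text)
-- ===== SOURCE B (Python) =====
-- from itertools import accumulate
-- from bisect import bisect_right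
--
--
-- def truncate_and_format_context(cleaned_text, max_length=3000):
--     """Prefix-sum table + binary search instead of the incremental break loop."""
--     sentences = cleaned_text.split('\n')
--     prefix = list(accumulate(len(s) for s in sentences))
--     cutoff = bisect_right(prefix, max_length)
--     return '\n'.join(sentences[:cutoff])
-- ===== Notes on version B (the rewrite author's own statement) =====
-- stated objective: alternative
-- what changed: Replaces the incremental accumulate-and-break loop with a prefix-sum table over all sentence lengths plus a bisect_right binary search for the cutoff index, then a single slice-and-join.
import Mathlib
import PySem

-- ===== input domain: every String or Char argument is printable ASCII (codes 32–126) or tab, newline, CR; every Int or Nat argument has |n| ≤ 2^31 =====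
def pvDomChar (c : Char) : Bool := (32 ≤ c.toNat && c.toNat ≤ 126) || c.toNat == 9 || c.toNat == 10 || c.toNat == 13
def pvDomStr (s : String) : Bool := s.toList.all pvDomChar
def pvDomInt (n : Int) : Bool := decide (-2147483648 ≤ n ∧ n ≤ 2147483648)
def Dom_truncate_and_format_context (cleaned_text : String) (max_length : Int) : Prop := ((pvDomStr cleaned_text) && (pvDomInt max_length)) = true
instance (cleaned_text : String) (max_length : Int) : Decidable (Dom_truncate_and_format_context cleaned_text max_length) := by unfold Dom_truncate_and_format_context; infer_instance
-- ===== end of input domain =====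

-- B replaces A's incremental accumulate-and-break loop by a prefix-sum table plus a
-- bisect_right binary search for the cutoff (alternative decomposition, same cost).

-- ===== PORT A =====
-- the for-loop of A: walks the sentences, appending while the running length fits, break otherwise
def pvALoop (max_length : Int) : List String → Int → List String
  | [], _ => []
  | s :: rest, cur =>
    if cur + PySem.Str.len s ≤ max_length then s :: pvALoop max_length rest (cur + PySem.Str.len s)
    else []

def truncate_and_format_context (cleaned_text : String) (max_length : Int) : String :=
  let sentences := (PySem.Str.split? cleaned_text "\n").getD []   -- sep "\n" ≠ "", so split? is always some
  PySem.Str.join "\n" (pvALoop max_length sentences 0)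

-- ===== PORT B =====
-- itertools.accumulate of the sentence lengths (hand-ported, exact: running totals after each element)
def pvPrefix : List String → Int → List Int
  | [], _ => []
  | s :: rest, tot => (tot + PySem.Str.len s) :: pvPrefix rest (tot + PySem.Str.len s)

def truncate_and_format_context_alt (cleaned_text : String) (max_length : Int) : String :=
  let sentences := (PySem.Str.split? cleaned_text "\n").getD []   -- sep "\n" ≠ "", so split? is always some
  let prefixSums := pvPrefix sentences 0
  let cutoff := PySem.List.bisectRight prefixSums max_length
  PySem.Str.join "\n" (sentences.take cutoff)

-- ===== PRECONDITION & SPEC =====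
def Spec_truncate_and_format_context (cleaned_text : String) (max_length : Int) (out : String) : Prop := out = truncate_and_format_context_alt cleaned_text max_length
instance (cleaned_text : String) (max_length : Int) (out : String) : Decidable (Spec_truncate_and_format_context cleaned_text max_length out) := by unfold Spec_truncate_and_format_context; infer_instance

-- ===== CLAIM (what is proved, stated in full; the proofs are below) =====
def Claim_equal_truncate_and_format_context : Prop := ∀ (cleaned_text : String) (max_length : Int), Dom_truncate_and_format_context cleaned_text max_length → Spec_truncate_and_format_context cleaned_text max_length (truncate_and_format_context cleaned_text max_length)

-- ===== LEMMAS AND PROOFS =====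

-- the number of sentences A's loop keeps, structurally
def pvCnt (max_length : Int) : List String → Int → Nat
  | [], _ => 0
  | s :: rest, cur =>
    if cur + PySem.Str.len s ≤ max_length then pvCnt max_length rest (cur + PySem.Str.len s) + 1
    else 0

lemma pvALoop_eq_take (x : Int) : ∀ (ss : List String) (cur : Int),
    pvALoop x ss cur = ss.take (pvCnt x ss cur) := by
  intro ss
  induction ss with
  | nil => intro cur; simp [pvALoop, pvCnt]
  | cons s rest ih =>
    intro cur
    simp only [pvALoop, pvCnt]
    split_ifs with h
    · simp [ih]
    · simp

lemma pvPrefix_lb : ∀ (ss : List String) (tot : Int), ∀ a ∈ pvPrefix ss tot, tot ≤ a := by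
  intro ss; induction ss with
  | nil => intro tot a ha; simp [pvPrefix] at ha
  | cons s rest ih =>
    intro tot a ha
    have hlen : (0 : Int) ≤ PySem.Str.len s := by simp [PySem.Str.len_eq]
    simp only [pvPrefix, List.mem_cons] at ha
    rcases ha with rfl | ha
    · omega
    · have := ih (tot + PySem.Str.len s) a ha; omega

lemma pvPrefix_pairwise : ∀ (ss : List String) (tot : Int),
    (pvPrefix ss tot).Pairwise (fun a b => a ≤ b) := by
  intro ss; induction ss with
  | nil => intro tot; simp [pvPrefix]
  | cons s rest ih =>
    intro tot
    simp only [pvPrefix, List.pairwise_cons]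
    exact ⟨fun a ha => pvPrefix_lb rest (tot + PySem.Str.len s) a ha, ih _⟩

-- pvCnt satisfies the bisect_right characterisation on the prefix list
lemma pvCnt_spec (x : Int) : ∀ (ss : List String) (cur : Int),
    pvCnt x ss cur ≤ (pvPrefix ss cur).length ∧
    (∀ j (hj : j < (pvPrefix ss cur).length), j < pvCnt x ss cur → (pvPrefix ss cur)[j] ≤ x) ∧
    (∀ j (hj : j < (pvPrefix ss cur).length), pvCnt x ss cur ≤ j → x < (pvPrefix ss cur)[j]) := by
  intro ss
  induction ss with
  | nil => intro cur; simp [pvCnt, pvPrefix]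
  | cons s rest ih =>
    intro cur
    simp only [pvCnt, pvPrefix, List.length_cons]
    obtain ⟨ih1, ih2, ih3⟩ := ih (cur + PySem.Str.len s)
    split_ifs with h
    · refine ⟨by omega, ?_, ?_⟩
      · intro j hj hlt
        cases j with
        | zero => simpa using h
        | succ j => simpa using ih2 j (by omega) (by omega)
      · intro j hj hge
        cases j with
        | zero => omega
        | succ j => simpa using ih3 j (by omega) (by omega)
    · refine ⟨by omega, by omega, ?_⟩
      intro j hj _
      cases j with
      | zero => simpa using (by omega : x < cur + PySem.Str.len s)
      | succ j =>
        have hmem : (pvPrefix rest (cur + PySem.Str.len s))[j] ∈ pvPrefix rest (cur + PySem.Str.len s) :=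
          List.getElem_mem _
        have := pvPrefix_lb rest (cur + PySem.Str.len s) _ hmem
        simpa using (by omega : x < (pvPrefix rest (cur + PySem.Str.len s))[j])

lemma pvCnt_eq_bisectRight (x : Int) (ss : List String) (cur : Int) :
    pvCnt x ss cur = PySem.List.bisectRight (pvPrefix ss cur) x := by
  obtain ⟨c1, c2, c3⟩ := pvCnt_spec x ss cur
  obtain ⟨b1, b2, b3⟩ := PySem.List.bisectRight_spec (pvPrefix ss cur) x (pvPrefix_pairwise ss cur)
  by_contra hne
  rcases Nat.lt_or_ge (pvCnt x ss cur) (PySem.List.bisectRight (pvPrefix ss cur) x) with h | h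
  · have hj : pvCnt x ss cur < (pvPrefix ss cur).length := by omega
    have := b2 _ hj h
    have := c3 _ hj (le_refl _)
    omega
  · have hlt : PySem.List.bisectRight (pvPrefix ss cur) x < pvCnt x ss cur := by omega
    have hj : PySem.List.bisectRight (pvPrefix ss cur) x < (pvPrefix ss cur).length := by omega
    have := c2 _ hj hlt
    have := b3 _ hj (le_refl _)
    omega

-- ===== VERDICT (by name: the statement is the Claim_ definition above) =====
theorem truncate_and_format_context_spec : Claim_equal_truncate_and_format_context := by
  intro t x _
  show truncate_and_format_context t x = truncate_and_format_context_alt t x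
  simp only [truncate_and_format_context, truncate_and_format_context_alt]
  rw [pvALoop_eq_take, pvCnt_eq_bisectRight]
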